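-- pv_equiv track=rewrite | github.com/mayur75584/GeeksForGeeks | GeeksforGeeks/267(Shop in Candy Store).py | candyStore
-- ===== SOURCE A (Python) =====
-- def candyStore(candies,N,K):
--     a=sorted(candies)
--     b=sorted(candies)
--     res=[]
--     sum1=0
--     sum2=0
--     while(len(a)!=0):
--         sum1+=a.pop(0)
--         if K==0:
--             continue
--         if len(a)>0:
--             del a[-K:len(a)]
--     res.append(sum1)
--
--     while(len(b)!=0):
--         sum2+=b.pop(-1)
--         if K==0:
--             continue
--         if len(b)>0:
--             del b[0:K]
--     res.append(sum2)
--     return res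
-- ===== SOURCE B (Python) =====
-- def candyStore(candies, N, K):
--     s = sorted(candies)
--     n = len(s)
--     mn = 0
--     i, j = 0, n - 1
--     while i <= j:
--         mn += s[i]
--         i += 1
--         j -= K
--     mx = 0
--     i, j = 0, n - 1
--     while i <= j:
--         mx += s[j]
--         j -= 1
--         i += K
--     return [mn, mx]
-- ===== Notes on version B (the rewrite author's own statement) =====
-- stated objective: faster
-- what changed: A repeatedly mutates two sorted copies with pop(0) and del slices (each O(N)); B makes one two-pointer index sweep over a single sorted list with no list mutation.
-- outside the precondition, e.g. on candyStore([1, 2, 3], 3, -1): A returns [3, 5], B raises IndexError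
import Mathlib
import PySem

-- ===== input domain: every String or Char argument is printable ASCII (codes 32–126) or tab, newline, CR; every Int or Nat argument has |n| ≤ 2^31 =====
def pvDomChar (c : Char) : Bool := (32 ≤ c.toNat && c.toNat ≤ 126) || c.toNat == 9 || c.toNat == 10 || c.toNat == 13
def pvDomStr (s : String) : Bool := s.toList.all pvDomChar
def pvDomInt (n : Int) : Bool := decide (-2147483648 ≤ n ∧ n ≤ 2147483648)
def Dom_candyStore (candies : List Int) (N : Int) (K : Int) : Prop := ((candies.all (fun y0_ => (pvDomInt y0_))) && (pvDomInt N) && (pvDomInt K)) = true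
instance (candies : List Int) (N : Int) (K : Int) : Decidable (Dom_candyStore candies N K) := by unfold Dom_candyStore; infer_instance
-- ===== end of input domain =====

-- B replaces A's repeated pop(0)/del-slice loops on mutating copies by one two-pointer
-- index sweep over the sorted list (no list mutation), a genuinely different traversal.

-- ===== PORT A =====
-- 'del a[-K:len(a)]' leaves a[:-K] (a[len(a):] is empty): ported as slice a none (some (-K)).
def candyAux1 (a : List Int) (K sum1 : Int) : Int :=
  match a with
  | [] => sum1
  | x :: rest =>                                   -- sum1 += a.pop(0)
    if K = 0 then candyAux1 rest K (sum1 + x)      -- continue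
    else if 0 < rest.length then
      candyAux1 (PySem.List.slice rest none (some (-K))) K (sum1 + x)
    else candyAux1 rest K (sum1 + x)
termination_by a.length
decreasing_by
  all_goals simp [PySem.List.slice]

-- 'del b[0:K]' leaves b[K:] (b[:0] is empty): ported as slice b (some K) none.
def candyAux2 (b : List Int) (K sum2 : Int) : Int :=
  match h : PySem.List.pop? b (-1) with            -- sum2 += b.pop(-1)  (none only when b = [])
  | none => sum2
  | some (x, b1) =>
    if K = 0 then candyAux2 b1 K (sum2 + x)        -- continue
    else if 0 < b1.length then
      candyAux2 (PySem.List.slice b1 (some K) none) K (sum2 + x)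
    else candyAux2 b1 K (sum2 + x)
termination_by b.length
decreasing_by
  all_goals have hl := PySem.List.length_of_pop?_eq_some b h
  all_goals simp [PySem.List.slice]
  all_goals simp at hl
  all_goals omega

def candyStore (candies : List Int) (N : Int) (K : Int) : List Int :=
  let a := PySem.List.sorted candies (fun x => x) false
  let b := PySem.List.sorted candies (fun x => x) false
  let res : List Int := []
  let sum1 := candyAux1 a K 0
  let res := res ++ [sum1]
  let sum2 := candyAux2 b K 0
  let res := res ++ [sum2]
  res

-- ===== PORT B =====
-- (the '0 ≤ K' conjunct in each loop guard is a totality guard only: Source B's loop raises an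
--  IndexError for K < 0, which Pre_ excludes)
def altLoopMin (s : List Int) (i j K acc : Int) : Int :=
  if i ≤ j ∧ 0 ≤ K then
    altLoopMin s (i + 1) (j - K) K (acc + PySem.List.pyGetD s i 0)
  else acc
termination_by (j + 1 - i).toNat
decreasing_by omega

def altLoopMax (s : List Int) (i j K acc : Int) : Int :=
  if i ≤ j ∧ 0 ≤ K then
    altLoopMax s (i + K) (j - 1) K (acc + PySem.List.pyGetD s j 0)
  else acc
termination_by (j + 1 - i).toNat
decreasing_by omega

def candyStore_alt (candies : List Int) (N : Int) (K : Int) : List Int :=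
  let s := PySem.List.sorted candies (fun x => x) false
  let n : Int := s.length
  [altLoopMin s 0 (n - 1) K 0, altLoopMax s 0 (n - 1) K 0]

-- ===== PRECONDITION & SPEC =====
-- Pre_ excludes negative K, which is outside the problem's natural domain (K is the count of
-- free candies per purchase); there A's negative-bound slice deletions accidentally keep a
-- prefix/suffix and still return, while B's index sweep runs past the end and raises.
def Pre_candyStore (candies : List Int) (N : Int) (K : Int) : Prop := 0 ≤ K
instance (candies : List Int) (N : Int) (K : Int) : Decidable (Pre_candyStore candies N K) := by unfold Pre_candyStore; infer_instance

def pvWitness_candyStore : List Int × Int × Int := ([3, 2, 1, 4], 4, 2)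

def Spec_candyStore (candies : List Int) (N : Int) (K : Int) (out : List Int) : Prop := out = candyStore_alt candies N K
instance (candies : List Int) (N : Int) (K : Int) (out : List Int) : Decidable (Spec_candyStore candies N K out) := by unfold Spec_candyStore; infer_instance

-- ===== CLAIM (what is proved, stated in full; the proofs are below) =====
def Claim_equal_candyStore : Prop := ∀ (candies : List Int) (N : Int) (K : Int), Dom_candyStore candies N K → Pre_candyStore candies N K → Spec_candyStore candies N K (candyStore candies N K)

-- ===== LEMMAS AND PROOFS =====

-- A's min loop on the window s[i..j] equals B's min two-pointer loop (min_bridge);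
-- A's max loop likewise (max_bridge).
lemma sliceTo_eq_take {α : Type} (xs : List α) (b : Int) :
    PySem.List.slice xs none (some b) = xs.take (PySem.List.clampIdx xs.length b) := by
  simp [PySem.List.slice]

lemma clampIdx_negK (n : Nat) (K : Int) (hK : 0 < K) :
    PySem.List.clampIdx n (-K) = ((n : Int) - K).toNat := by
  unfold PySem.List.clampIdx
  split_ifs <;> omega

lemma candyAux1_cons (x : Int) (rest : List Int) (K s1 : Int) :
    candyAux1 (x :: rest) K s1
      = if K = 0 then candyAux1 rest K (s1 + x)
        else if 0 < rest.length then
          candyAux1 (PySem.List.slice rest none (some (-K))) K (s1 + x)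
        else candyAux1 rest K (s1 + x) := by
  rw [candyAux1]

lemma candyAux1_nil (K s1 : Int) : candyAux1 [] K s1 = s1 := by rw [candyAux1]

lemma altLoopMin_eq (s : List Int) (i j K acc : Int) :
    altLoopMin s i j K acc
      = if i ≤ j ∧ 0 ≤ K then altLoopMin s (i + 1) (j - K) K (acc + PySem.List.pyGetD s i 0)
        else acc := by
  rw [altLoopMin]

lemma min_bridge (s : List Int) (K : Int) (hK : 0 ≤ K) :
    ∀ (m : Nat) (i j acc : Int), (j + 1 - i).toNat ≤ m → 0 ≤ i → j < (s.length : Int) →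
      candyAux1 ((s.drop i.toNat).take (j + 1 - i).toNat) K acc = altLoopMin s i j K acc := by
  intro m
  induction m with
  | zero =>
    intro i j acc hm hi hj
    have ht : (j + 1 - i).toNat = 0 := by omega
    have hnc : ¬ (i ≤ j ∧ 0 ≤ K) := by omega
    rw [ht, altLoopMin_eq, if_neg hnc]
    simp [candyAux1_nil]
  | succ m ih =>
    intro i j acc hm hi hj
    by_cases hij : i ≤ j
    · have hd : i.toNat < s.length := by omega
      have ht1 : 1 ≤ (j + 1 - i).toNat := by omega
      obtain ⟨t', ht'⟩ : ∃ t', (j + 1 - i).toNat = t' + 1 := ⟨(j + 1 - i).toNat - 1, by omega⟩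
      have hlist : (s.drop i.toNat).take (j + 1 - i).toNat
          = s[i.toNat] :: (s.drop (i.toNat + 1)).take t' := by
        rw [List.drop_eq_getElem_cons hd, ht', List.take_succ_cons]
      have hgd : PySem.List.pyGetD s i 0 = s[i.toNat] := PySem.List.pyGetD_eq_getElem s 0 hi (by omega)
      have hrl : ((s.drop (i.toNat + 1)).take t').length = t' := by
        simp; omega
      rw [hlist, candyAux1_cons, altLoopMin_eq, if_pos (And.intro hij hK), hgd]
      by_cases hK0 : K = 0
      · simp only [if_pos hK0]
        subst hK0
        have hre : (s.drop (i + 1).toNat).take ((j - 0 + 1 - (i + 1)).toNat)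
            = (s.drop (i.toNat + 1)).take t' := by
          rw [show ((i : Int) + 1).toNat = i.toNat + 1 by omega,
            show ((j : Int) - 0 + 1 - (i + 1)).toNat = t' by omega]
        have := ih (i + 1) (j - 0) (acc + s[i.toNat]) (by omega) (by omega) (by omega)
        rw [hre] at this
        rw [← this]
      · simp only [if_neg hK0]
        have hKpos : 0 < K := by omega
        by_cases hij2 : i < j
        · rw [if_pos (by rw [hrl]; omega : 0 < ((s.drop (i.toNat + 1)).take t').length)]
          have hslice : PySem.List.slice ((s.drop (i.toNat + 1)).take t') none (some (-K))
              = (s.drop (i.toNat + 1)).take (j - K + 1 - (i + 1)).toNat := by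
            rw [sliceTo_eq_take, hrl, clampIdx_negK _ _ hKpos, List.take_take]
            congr 1
            omega
          rw [hslice]
          have hre : (s.drop (i + 1).toNat).take ((j - K + 1 - (i + 1)).toNat)
              = (s.drop (i.toNat + 1)).take ((j - K + 1 - (i + 1)).toNat) := by
            rw [show ((i : Int) + 1).toNat = i.toNat + 1 by omega]
          have := ih (i + 1) (j - K) (acc + s[i.toNat]) (by omega) (by omega) (by omega)
          rw [hre] at this
          rw [← this]
        · rw [if_neg (by rw [hrl]; omega : ¬ 0 < ((s.drop (i.toNat + 1)).take t').length)]
          have ht'0 : t' = 0 := by omega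
          rw [ht'0]
          simp only [List.take_zero]
          rw [candyAux1_nil, altLoopMin_eq, if_neg (by omega : ¬ ((i + 1 : Int) ≤ j - K ∧ 0 ≤ K))]
    · have ht : (j + 1 - i).toNat = 0 := by omega
      rw [ht, altLoopMin_eq, if_neg (by omega : ¬ (i ≤ j ∧ 0 ≤ K))]
      simp [candyAux1_nil]

lemma candyAux2_nil (K s2 : Int) : candyAux2 [] K s2 = s2 := by
  rw [candyAux2]
  rfl

lemma candyAux2_snoc (xs : List Int) (x K s2 : Int) :
    candyAux2 (xs ++ [x]) K s2
      = if K = 0 then candyAux2 xs K (s2 + x)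
        else if 0 < xs.length then
          candyAux2 (PySem.List.slice xs (some K) none) K (s2 + x)
        else candyAux2 xs K (s2 + x) := by
  rw [candyAux2]
  split
  · next heq => rw [PySem.List.pop?_last] at heq; cases heq
  · next x' b1' heq =>
      rw [PySem.List.pop?_last] at heq
      cases heq
      rfl

lemma altLoopMax_eq (s : List Int) (i j K acc : Int) :
    altLoopMax s i j K acc
      = if i ≤ j ∧ 0 ≤ K then altLoopMax s (i + K) (j - 1) K (acc + PySem.List.pyGetD s j 0)
        else acc := by
  rw [altLoopMax]

lemma max_bridge (s : List Int) (K : Int) (hK : 0 ≤ K) :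
    ∀ (m : Nat) (i j acc : Int), (j + 1 - i).toNat ≤ m → 0 ≤ i → j < (s.length : Int) →
      candyAux2 ((s.drop i.toNat).take (j + 1 - i).toNat) K acc = altLoopMax s i j K acc := by
  intro m
  induction m with
  | zero =>
    intro i j acc hm hi hj
    have ht : (j + 1 - i).toNat = 0 := by omega
    rw [ht, altLoopMax_eq, if_neg (by omega : ¬ (i ≤ j ∧ 0 ≤ K))]
    simp [candyAux2_nil]
  | succ m ih =>
    intro i j acc hm hi hj
    by_cases hij : i ≤ j
    · have hd : i.toNat < s.length := by omega
      have hjd : j.toNat < s.length := by omega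
      obtain ⟨t', ht'⟩ : ∃ t', (j + 1 - i).toNat = t' + 1 := ⟨(j + 1 - i).toNat - 1, by omega⟩
      have hW : (s.drop i.toNat).take (j + 1 - i).toNat
          = (s.drop i.toNat).take t' ++ [s[j.toNat]] := by
        rw [ht', List.take_add_one]
        congr 1
        rw [List.getElem?_drop]
        rw [List.getElem?_eq_getElem (by omega : i.toNat + t' < s.length)]
        simp
        congr 1
        omega
      have hxl : ((s.drop i.toNat).take t').length = t' := by
        simp; omega
      have hgd : PySem.List.pyGetD s j 0 = s[j.toNat] :=
        PySem.List.pyGetD_eq_getElem s 0 (by omega) hj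
      rw [hW, candyAux2_snoc, altLoopMax_eq, if_pos (And.intro hij hK), hgd]
      by_cases hK0 : K = 0
      · simp only [if_pos hK0]
        subst hK0
        have hre : (s.drop (i + 0).toNat).take ((j - 1 + 1 - (i + 0)).toNat)
            = (s.drop i.toNat).take t' := by
          rw [show ((i : Int) + 0).toNat = i.toNat by omega,
            show ((j : Int) - 1 + 1 - (i + 0)).toNat = t' by omega]
        have := ih (i + 0) (j - 1) (acc + s[j.toNat]) (by omega) (by omega) (by omega)
        rw [hre] at this
        rw [← this]
      · simp only [if_neg hK0]
        have hKpos : 0 < K := by omega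
        by_cases hij2 : i < j
        · rw [if_pos (by rw [hxl]; omega : 0 < ((s.drop i.toNat).take t').length)]
          have hslice : PySem.List.slice ((s.drop i.toNat).take t') (some K) none
              = (s.drop (i + K).toNat).take ((j - 1 + 1 - (i + K)).toNat) := by
            rw [PySem.List.slice_from _ hK, List.drop_take, List.drop_drop]
            rw [show i.toNat + K.toNat = ((i : Int) + K).toNat by omega,
              show t' - K.toNat = ((j : Int) - 1 + 1 - (i + K)).toNat by omega]
          rw [hslice]
          have := ih (i + K) (j - 1) (acc + s[j.toNat]) (by omega) (by omega) (by omega)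
          rw [← this]
        · rw [if_neg (by rw [hxl]; omega : ¬ 0 < ((s.drop i.toNat).take t').length)]
          have ht'0 : t' = 0 := by omega
          rw [ht'0]
          simp only [List.take_zero]
          rw [candyAux2_nil, altLoopMax_eq, if_neg (by omega : ¬ ((i + K : Int) ≤ j - 1 ∧ 0 ≤ K))]
    · have ht : (j + 1 - i).toNat = 0 := by omega
      rw [ht, altLoopMax_eq, if_neg (by omega : ¬ (i ≤ j ∧ 0 ≤ K))]
      simp [candyAux2_nil]

-- ===== VERDICT (by name: the statement is the Claim_ definition above) =====
theorem candyStore_spec : Claim_equal_candyStore := by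
  intro candies N K _ hpre
  unfold Spec_candyStore candyStore candyStore_alt
  set s := PySem.List.sorted candies (fun x => x) false with hs
  have hfull : (s.drop (0:Int).toNat).take (((s.length : Int) - 1 + 1 - 0)).toNat = s := by
    simp
  have h1 := min_bridge s K hpre ((s.length : Int) - 1 + 1 - 0).toNat 0 ((s.length : Int) - 1) 0
    le_rfl (by omega) (by omega)
  have h2 := max_bridge s K hpre ((s.length : Int) - 1 + 1 - 0).toNat 0 ((s.length : Int) - 1) 0
    le_rfl (by omega) (by omega)
  rw [hfull] at h1 h2
  simp only [h1, h2, List.nil_append, List.cons_append]
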